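-- pv_equiv track=rewrite | github.com/stupidchen/leetcode | src/leetcode/P1170.py | numSmallerByFrequency
-- ===== SOURCE A (Python) =====
-- from bisect import bisect_right
-- from typing import List
--
-- def numSmallerByFrequency(queries: List[str], words: List[str]) -> List[int]:
--     def f(word):
--         max_c = 'z'
--         ret = 0
--         for c in word:
--             if max_c > c:
--                 max_c = c
--                 ret = 1
--             elif max_c == c:
--                 ret += 1
--         return ret
--
--     a = sorted(map(f, words))
--     n = len(words)
--     ret = []
--     for query in queries:
--         ff = f(query)
--         index = bisect_right(a, ff)
--         ret.append(n - index)
--     return ret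
-- ===== SOURCE B (Python) =====
-- def numSmallerByFrequency(queries, words):
--     # f(w) = frequency of the smallest character, computed with builtins:
--     # appending 'z' reproduces A's 'z' seed (chars above 'z' never count).
--     def f(w):
--         return w.count(min(w + 'z'))
--
--     fs = [f(w) for w in words]
--     cache = {}
--     out = []
--     for q in queries:
--         ff = f(q)
--         if ff not in cache:
--             cache[ff] = sum(fv > ff for fv in fs)
--         out.append(cache[ff])
--     return out
-- ===== Notes on version B (the rewrite author's own statement) =====
-- stated objective: alternative
-- what changed: B replaces A's hand-rolled state-machine f with the builtin closed form w.count(min(w+'z')) and drops the sort + bisect_right entirely, answering each query by directly counting the word f-values strictly greater than the query's f-value, memoised per distinct query f-value.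
import Mathlib
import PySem

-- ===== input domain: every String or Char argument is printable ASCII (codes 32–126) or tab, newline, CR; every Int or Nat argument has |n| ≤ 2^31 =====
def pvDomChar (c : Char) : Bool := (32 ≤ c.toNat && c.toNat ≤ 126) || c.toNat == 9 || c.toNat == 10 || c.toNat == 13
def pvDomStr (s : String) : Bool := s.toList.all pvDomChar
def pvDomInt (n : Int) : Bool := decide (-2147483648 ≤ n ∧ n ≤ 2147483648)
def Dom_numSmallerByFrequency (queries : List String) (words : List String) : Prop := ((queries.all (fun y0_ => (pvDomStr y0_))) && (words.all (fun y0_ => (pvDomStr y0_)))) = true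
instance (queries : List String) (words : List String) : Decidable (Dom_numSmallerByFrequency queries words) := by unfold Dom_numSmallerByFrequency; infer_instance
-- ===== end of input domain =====

-- B replaces A's state-machine f with the builtin closed form w.count(min(w+'z')) and drops
-- the sort + bisect_right, counting strictly-greater f-values directly (memoised per distinct query f-value; same return value).
-- ===== PORT A =====
-- f helper of A: state (max_c, ret) folded over the word's characters
def pvF (word : String) : Int :=
  (word.toList.foldl
    (fun (st : Char × Int) c =>
      if st.1 > c then (c, 1)
      else if st.1 = c then (st.1, st.2 + 1)
      else st)
    ('z', 0)).2

def numSmallerByFrequency (queries : List String) (words : List String) : List Int :=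
  let a := PySem.List.sorted (words.map pvF) (fun x => x)
  let n := words.length
  queries.foldl
    (fun ret query =>
      let ff := pvF query
      let index := PySem.List.bisectRight a ff
      ret ++ [(n : Int) - (index : Int)])
    []

-- ===== PORT B =====
-- B's f: w.count(min(w + 'z')); min of the nonempty char list is the running min from 'z',
-- and str.count of a single character is exactly the character count.
def pvMinCount (w : String) : Int :=
  let m := w.toList.foldl min 'z'
  ((w.toList.count m : Nat) : Int)

def numSmallerByFrequency_alt (queries : List String) (words : List String) : List Int :=
  let fs := words.map pvMinCount
  -- sum(fv > ff for fv in fs) is the count of true ones; cache[ff] read via getD (ff is always a key here)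
  (queries.foldl
    (fun (st : PySem.Dict Int Int × List Int) q =>
      let ff := pvMinCount q
      let cache :=
        if st.1.contains ff then st.1
        else st.1.insert ff (fs.countP (fun fv => ff < fv) : Int)
      (cache, st.2 ++ [cache.getD ff 0]))
    (PySem.Dict.empty, [])).2

-- ===== PRECONDITION & SPEC =====
def Spec_numSmallerByFrequency (queries : List String) (words : List String) (out : List Int) : Prop := out = numSmallerByFrequency_alt queries words
instance (queries : List String) (words : List String) (out : List Int) : Decidable (Spec_numSmallerByFrequency queries words out) := by unfold Spec_numSmallerByFrequency; infer_instance

-- ===== CLAIM (what is proved, stated in full; the proofs are below) =====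
def Claim_equal_numSmallerByFrequency : Prop := ∀ (queries : List String) (words : List String), Dom_numSmallerByFrequency queries words → Spec_numSmallerByFrequency queries words (numSmallerByFrequency queries words)

-- ===== LEMMAS AND PROOFS =====

-- A's state machine computes (running min, count of that min so far)
lemma pvF_state (l : List Char) (mc : Char) (r : Int) :
    (l.foldl
      (fun (st : Char × Int) c =>
        if st.1 > c then (c, 1)
        else if st.1 = c then (st.1, st.2 + 1)
        else st)
      (mc, r))
    = (l.foldl min mc,
       (if l.foldl min mc < mc then 0 else r) + (l.count (l.foldl min mc) : Int)) := by
  induction l generalizing mc r with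
  | nil => simp
  | cons c tl ih =>
    have hmin_le : ∀ (a : Char) (xs : List Char), xs.foldl min a ≤ a := by
      intro a xs
      induction xs generalizing a with
      | nil => simp
      | cons x xs ih2 => simpa using le_trans (ih2 (min a x)) (min_le_left a x)
    simp only [List.foldl_cons]
    by_cases h1 : mc > c
    · rw [if_pos h1, ih c 1]
      have hm : min mc c = c := min_eq_right (le_of_lt h1)
      simp only [hm]
      have hle := hmin_le c tl
      rcases lt_or_eq_of_le hle with h2 | h2
      · have hne : c ≠ tl.foldl min c := (ne_of_gt h2)
        simp [h2, lt_trans h2 h1, hne]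
      · simp only [h2]
        rw [if_neg (lt_irrefl c), if_pos h1]
        simp
        omega
    · by_cases h2 : mc = c
      · subst h2
        rw [if_neg h1, if_pos rfl, ih mc (r + 1)]
        have hm : min mc mc = mc := min_self mc
        simp only [hm]
        have hle := hmin_le mc tl
        rcases lt_or_eq_of_le hle with h3 | h3
        · have hne : mc ≠ tl.foldl min mc := (ne_of_gt h3)
          simp [h3, hne]
        · simp only [h3]
          rw [if_neg (lt_irrefl mc), if_neg (lt_irrefl mc)]
          simp
          omega
      · rw [if_neg h1, if_neg h2, ih mc r]
        have hmcc : mc < c := lt_of_le_of_ne (le_of_not_gt h1) h2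
        have hm : min mc c = mc := min_eq_left (le_of_lt hmcc)
        simp only [hm]
        have hle := hmin_le mc tl
        have hne : c ≠ tl.foldl min mc := ne_of_gt (lt_of_le_of_lt hle hmcc)
        simp [hne]

-- hence A's f is B's closed form
lemma pvF_eq_pvMinCount : pvF = pvMinCount := by
  funext w
  unfold pvF pvMinCount
  rw [pvF_state]
  split_ifs <;> simp

lemma countP_eq_of_split (a : List Int) (p : Int → Bool) (k : Nat)
    (hk : k ≤ a.length)
    (h1 : ∀ i (h : i < a.length), i < k → p a[i])
    (h2 : ∀ i (h : i < a.length), k ≤ i → ¬ p a[i]) :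
    a.countP p = k := by
  induction a generalizing k with
  | nil => simp at hk ⊢; omega
  | cons hd tl ih =>
    cases k with
    | zero =>
      have hhd : ¬ p hd := by simpa using h2 0 (by simp) (Nat.zero_le _)
      have : tl.countP p = 0 := by
        apply ih 0 (Nat.zero_le _)
        · intro i h hi; omega
        · intro i h _
          have := h2 (i+1) (by simpa using Nat.succ_lt_succ h) (Nat.zero_le _)
          simpa using this
      simp [hhd, this]
    | succ k' =>
      have hhd : p hd := by simpa using h1 0 (by simp) (Nat.succ_pos _)
      have htl : tl.countP p = k' := by
        apply ih k' (by simpa using hk)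
        · intro i h hi
          have := h1 (i+1) (by simpa using Nat.succ_lt_succ h) (by omega)
          simpa using this
        · intro i h hi
          have := h2 (i+1) (by simpa using Nat.succ_lt_succ h) (by omega)
          simpa using this
      simp [hhd, htl]

lemma bisect_eq_countP (a : List Int) (x : Int)
    (hs : a.Pairwise (· ≤ ·)) :
    PySem.List.bisectRight a x = a.countP (fun y => y ≤ x) := by
  obtain ⟨hle, h1, h2⟩ := PySem.List.bisectRight_spec a x hs
  refine (countP_eq_of_split a _ _ hle ?_ ?_).symm
  · intro i h hi; simpa using h1 i h hi
  · intro i h hi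
    have := h2 i h hi
    simp only [decide_eq_true_eq]
    omega

lemma loop_eq_map (queries : List String) (g : String → Int) :
    queries.foldl (fun ret q => ret ++ [g q]) [] = queries.map g := by
  have h : ∀ acc : List Int, queries.foldl (fun ret q => ret ++ [g q]) acc = acc ++ queries.map g := by
    induction queries with
    | nil => intro acc; simp
    | cons hd tl ih => intro acc; simp [List.foldl_cons, ih]
  simpa using h []


-- B's memoising query loop produces exactly the direct per-query counts
lemma cache_loop_eq_map (fs : List Int) (queries : List String) :
    ∀ (cache : PySem.Dict Int Int) (acc : List Int),
      (∀ k, cache.contains k → cache.getD k 0 = (fs.countP (fun fv => k < fv) : Int)) →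
      (queries.foldl
        (fun (st : PySem.Dict Int Int × List Int) q =>
          let ff := pvMinCount q
          let cache :=
            if st.1.contains ff then st.1
            else st.1.insert ff (fs.countP (fun fv => ff < fv) : Int)
          (cache, st.2 ++ [cache.getD ff 0]))
        (cache, acc)).2
      = acc ++ queries.map (fun q => (fs.countP (fun fv => pvMinCount q < fv) : Int)) := by
  induction queries with
  | nil => intro cache acc _; simp
  | cons q tl ih =>
    intro cache acc hinv
    simp only [List.foldl_cons, List.map_cons]
    by_cases hc : cache.contains (pvMinCount q)
    · simp only [hc, if_true]
      rw [ih cache _ hinv, hinv _ hc]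
      simp
    · simp only [if_neg hc]
      have hinv' : ∀ k, (cache.insert (pvMinCount q) (fs.countP (fun fv => pvMinCount q < fv) : Int)).contains k →
          (cache.insert (pvMinCount q) (fs.countP (fun fv => pvMinCount q < fv) : Int)).getD k 0
            = (fs.countP (fun fv => k < fv) : Int) := by
        intro k hk
        rw [PySem.Dict.getD_insert]
        by_cases hkq : k = pvMinCount q
        · simp [hkq]
        · simp only [hkq, if_neg, not_false_iff]
          apply hinv
          rw [PySem.Dict.contains_insert] at hk
          simpa [hkq] using hk
      rw [ih _ _ hinv']
      rw [PySem.Dict.getD_insert_self]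
      simp

lemma alt_eq_map (queries : List String) (words : List String) :
    numSmallerByFrequency_alt queries words
      = queries.map (fun q => ((words.map pvMinCount).countP (fun fv => pvMinCount q < fv) : Int)) := by
  unfold numSmallerByFrequency_alt
  rw [cache_loop_eq_map (words.map pvMinCount) queries PySem.Dict.empty []
        (by intro k hk; simp [PySem.Dict.contains_empty] at hk)]
  simp

-- ===== VERDICT (by name: the statement is the Claim_ definition above) =====
theorem numSmallerByFrequency_spec : Claim_equal_numSmallerByFrequency := by
  intro queries words _
  unfold Spec_numSmallerByFrequency
  rw [alt_eq_map, ← pvF_eq_pvMinCount]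
  unfold numSmallerByFrequency
  rw [loop_eq_map]
  apply List.map_congr_left
  intro q _
  set fs := words.map pvF with hfs
  set a := PySem.List.sorted fs (fun x => x) with ha
  have hperm : a.Perm fs := PySem.List.sorted_perm fs (fun x => x) false
  have hpw : a.Pairwise (· ≤ ·) := by
    simpa using PySem.List.sorted_pairwise fs (fun x => x)
  have hb := bisect_eq_countP a (pvF q) hpw
  have hcnt : a.countP (fun y => y ≤ pvF q) = fs.countP (fun y => y ≤ pvF q) :=
    hperm.countP_eq _
  have hlen : fs.length = words.length := by simp [hfs]
  have hsplit : fs.length = fs.countP (fun y => y ≤ pvF q) + fs.countP (fun y => pvF q < y) := by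
    have := List.length_eq_countP_add_countP (l := fs) (p := fun y => y ≤ pvF q)
    rw [this]
    congr 1
    apply List.countP_congr
    intro y _
    simp only [decide_eq_true_eq]
    omega
  have hble : PySem.List.bisectRight a (pvF q) ≤ fs.length := by
    rw [hb, hcnt]; exact List.countP_le_length
  rw [hb, hcnt]
  rw [← hlen]
  omega
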